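-- pv_equiv track=rewrite | github.com/ColeridgeGuo/leetcode | LC_290/Word Pattern.py | wordPattern_dictionary
-- ===== SOURCE A (Python) =====
-- def wordPattern_dictionary(pattern: str, str: str) -> bool:
--     """
--         Time Complexity: O(n)
--         Space Complexity: O(n)
--     """
--     words = str.split()
--     if len(pattern) != len(words):
--         return False  # if pattern and str has different lengths
--     pattern_word_map, words_matched = {}, set()
--     for i, pt in enumerate(pattern):
--         if pattern_word_map.get(pt, False):
--             if words[i] != pattern_word_map[pt]:
--                 return False  # if the patterns matches a different word
--         elif words[i] in words_matched:
--             return False  # if the word has been matched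
--         else:
--             pattern_word_map[pt] = words[i]  # map pattern to word
--             words_matched.add(words[i])  # mark word as matched
--     return True
-- ===== SOURCE B (Python) =====
-- def wordPattern_dictionary(pattern: str, str: str) -> bool:
--     words = str.split()
--     if len(pattern) != len(words):
--         return False
--     return len(set(pattern)) == len(set(words)) == len(set(zip(pattern, words)))
-- ===== Notes on version B (the rewrite author's own statement) =====
-- stated objective: simpler
-- what changed: Replaces the incremental char-to-word map and matched-word set with a one-line distinct-count check: the mapping is a consistent bijection iff the numbers of distinct pattern characters, distinct words and distinct (char, word) pairs coincide.
import Mathlib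
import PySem

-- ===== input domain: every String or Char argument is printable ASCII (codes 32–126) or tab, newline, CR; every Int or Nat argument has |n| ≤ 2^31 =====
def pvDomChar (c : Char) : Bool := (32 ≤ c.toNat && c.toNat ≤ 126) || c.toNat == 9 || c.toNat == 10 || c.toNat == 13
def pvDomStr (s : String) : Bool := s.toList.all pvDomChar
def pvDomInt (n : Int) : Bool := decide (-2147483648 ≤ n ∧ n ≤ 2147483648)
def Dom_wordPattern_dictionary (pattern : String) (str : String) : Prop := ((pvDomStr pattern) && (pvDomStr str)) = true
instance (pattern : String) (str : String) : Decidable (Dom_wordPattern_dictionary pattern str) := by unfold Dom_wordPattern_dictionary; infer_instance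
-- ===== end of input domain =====

-- ===== PORT A =====
-- B replaces A's incremental char-to-word map + matched-word set with a distinct-count check (objective: simpler).
-- A-side loop helper: `for i, pt in enumerate(pattern)`; inside the loop words[i] is always in
-- range (the length guard passed before the loop runs), so pyGetD's default "" is never used.
def pvLoopA (words : List String) : List (Int × Char) → PySem.Dict Char String → PySem.Set String → Bool
  | [], _, _ => true
  | (i, pt) :: rest, m, s =>
    -- `pattern_word_map.get(pt, False)` is truthy iff pt maps to a non-empty word ("" is falsy like False)
    if m.getD pt "" ≠ "" then
      if PySem.List.pyGetD words i "" ≠ m.getD pt "" then false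
      else pvLoopA words rest m s
    else if s.contains (PySem.List.pyGetD words i "") then false
    else pvLoopA words rest (m.insert pt (PySem.List.pyGetD words i ""))
           (s.add (PySem.List.pyGetD words i ""))

def wordPattern_dictionary (pattern : String) (str : String) : Bool :=
  let words := PySem.Str.split₀ str
  if PySem.Str.len pattern ≠ (words.length : Int) then false
  else pvLoopA words (PySem.List.enumerate pattern.toList) PySem.Dict.empty PySem.Set.empty

-- ===== PORT B =====
-- len(set(pattern)) == len(set(words)) == len(set(zip(pattern, words)))
def wordPattern_dictionary_alt (pattern : String) (str : String) : Bool :=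
  let words := PySem.Str.split₀ str
  if PySem.Str.len pattern ≠ (words.length : Int) then false
  else
    PySem.Set.len (PySem.Set.ofList pattern.toList) == PySem.Set.len (PySem.Set.ofList words)
      && PySem.Set.len (PySem.Set.ofList words) == PySem.Set.len (PySem.Set.ofList (pattern.toList.zip words))

-- ===== PRECONDITION & SPEC =====
def Spec_wordPattern_dictionary (pattern : String) (str : String) (out : Bool) : Prop := out = wordPattern_dictionary_alt pattern str
instance (pattern : String) (str : String) (out : Bool) : Decidable (Spec_wordPattern_dictionary pattern str out) := by unfold Spec_wordPattern_dictionary; infer_instance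

-- ===== CLAIM (what is proved, stated in full; the proofs are below) =====
def Claim_equal_wordPattern_dictionary : Prop := ∀ (pattern : String) (str : String), Dom_wordPattern_dictionary pattern str → Spec_wordPattern_dictionary pattern str (wordPattern_dictionary pattern str)

-- ===== LEMMAS AND PROOFS =====

-- every word produced by str.split() is non-empty
theorem pvGo_ne_nil (s : List Char) : ∀ (cur : List Char) (acc : List (List Char)),
    (∀ w ∈ acc, w ≠ []) → ∀ w ∈ PySem.Chars.split₀.go s cur acc, w ≠ [] := by
  induction s with
  | nil =>
    intro cur acc hacc w hw
    rw [PySem.Chars.split₀.go] at hw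
    by_cases hc : cur.isEmpty
    · simp [hc] at hw; exact hacc w hw
    · simp [hc] at hw
      rcases hw with h | h
      · exact hacc w h
      · subst h; simpa [List.isEmpty_iff] using hc
  | cons c rest ih =>
    intro cur acc hacc w hw
    rw [PySem.Chars.split₀.go] at hw
    by_cases hsp : PySem.Chars.isspace c
    · by_cases hc : cur.isEmpty
      · simp [hsp, hc] at hw; exact ih [] acc hacc w hw
      · simp [hsp, hc] at hw
        refine ih [] (cur.reverse :: acc) ?_ w hw
        intro w' hw'
        rcases List.mem_cons.1 hw' with h | h
        · subst h; simpa [List.isEmpty_iff] using hc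
        · exact hacc w' h
    · simp [hsp] at hw; exact ih (c :: cur) acc hacc w hw


theorem pvSplit_ne_empty (str : String) : ∀ w ∈ PySem.Str.split₀ str, w ≠ "" := by
  intro w hw hne
  have hmem : w.toList ∈ PySem.Chars.split₀ str.toList := by
    rw [← PySem.Str.split₀_map_toList]
    exact List.mem_map_of_mem hw
  have := pvGo_ne_nil str.toList [] [] (by simp) w.toList (by simpa [PySem.Chars.split₀] using hmem)
  subst hne; simp at this

-- |set(xs)| is the number of distinct elements of xs
theorem pvCardOfList {α : Type} [BEq α] [LawfulBEq α] [DecidableEq α] (xs : List α) :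
    (PySem.Set.ofList xs).length = xs.toFinset.card := by
  have h1 : (PySem.Set.ofList xs).toFinset = xs.toFinset := by
    ext a; simp [PySem.Set.mem_ofList]
  rw [← h1, List.toFinset_card_of_nodup (PySem.Set.nodup_ofList xs)]

-- |set(map f z)| = |set(z)| iff f is injective on the elements of z
theorem pvCardMapEq {α β : Type} [DecidableEq α] [DecidableEq β] (z : List α) (f : α → β) :
    (z.map f).toFinset.card = z.toFinset.card ↔ ∀ a ∈ z, ∀ b ∈ z, f a = f b → a = b := by
  have h : (z.map f).toFinset = z.toFinset.image f := by ext b; simp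
  rw [h, Finset.card_image_iff]
  constructor
  · intro hinj a ha b hb hab
    exact hinj (by simpa using ha) (by simpa using hb) hab
  · intro h a ha b hb hab
    exact h a (by simpa using ha) b (by simpa using hb) hab

-- A's loop re-expressed on the zipped list (proof-side helper; not a port)
def pvLoopZ : List (Char × String) → PySem.Dict Char String → PySem.Set String → Bool
  | [], _, _ => true
  | (c, w) :: rest, m, s =>
    if m.getD c "" ≠ "" then
      if w ≠ m.getD c "" then false else pvLoopZ rest m s
    else if s.contains w then false
    else pvLoopZ rest (m.insert c w) (s.add w)

theorem pvLoopA_eq_loopZ (words : List String) (cs : List Char) (k : Nat)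
    (m : PySem.Dict Char String) (s : PySem.Set String)
    (hk : k + cs.length ≤ words.length) :
    pvLoopA words (PySem.List.enumerate cs (k : Int)) m s = pvLoopZ (cs.zip (words.drop k)) m s := by
  induction cs generalizing k m s with
  | nil => simp [PySem.List.enumerate, pvLoopA, pvLoopZ]
  | cons c rest ih =>
    have hlt : k < words.length := by simp at hk; omega
    have hdrop : words.drop k = words[k] :: words.drop (k + 1) := List.drop_eq_getElem_cons hlt
    have hget : PySem.List.pyGetD words (k : Int) "" = words[k] := by
      rw [PySem.List.pyGetD_natCast, List.getD_eq_getElem _ _ hlt]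
    have hcast : (k : Int) + 1 = ((k + 1 : Nat) : Int) := by push_cast; ring
    show pvLoopA words ((k, c) :: PySem.List.enumerate rest ((k : Int) + 1)) m s = _
    rw [hdrop, List.zip_cons_cons]
    simp only [pvLoopA, pvLoopZ, hget, hcast]
    have ih' := fun m s => ih (k + 1) m s (by simp at hk ⊢; omega)
    split_ifs <;> first | rfl | exact ih' _ _

-- characterisation of A's loop: it returns True iff the remaining pairs are mutually
-- consistent and consistent with the injective map built so far
theorem pvLoopZ_iff (z : List (Char × String)) :
    ∀ (m : PySem.Dict Char String) (s : PySem.Set String),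
    (∀ w : String, s.contains w = true ↔ ∃ c, m.get? c = some w) →
    (∀ c w, m.get? c = some w → w ≠ "") →
    (∀ c₁ c₂ w, m.get? c₁ = some w → m.get? c₂ = some w → c₁ = c₂) →
    (∀ a ∈ z, a.2 ≠ "") →
    (pvLoopZ z m s = true ↔
      ((∀ a ∈ z, ∀ b ∈ z, (a.1 = b.1 ↔ a.2 = b.2)) ∧
       (∀ a ∈ z, ∀ c w, m.get? c = some w → (a.1 = c ↔ a.2 = w)))) := by
  induction z with
  | nil => intro m s _ _ _ _; simp [pvLoopZ]
  | cons hd rest ih =>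
    obtain ⟨c, w⟩ := hd
    intro m s hs hne hinj hz
    have hzrest : ∀ a ∈ rest, a.2 ≠ "" := fun a ha => hz a (List.mem_cons_of_mem _ ha)
    have hwne : w ≠ "" := hz (c, w) List.mem_cons_self
    rw [pvLoopZ]
    rcases hgc : m.get? c with _ | v
    · -- pt not yet mapped
      have hgd : m.getD c "" = "" := by rw [PySem.Dict.getD_eq_get?_getD, hgc]; rfl
      rw [hgd, if_neg (by simp)]
      by_cases hws : s.contains w = true
      · rw [if_pos hws]
        simp only [Bool.false_eq_true, false_iff]
        rintro ⟨hP, hC⟩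
        obtain ⟨c', hc'⟩ := (hs w).1 hws
        have hcc : c = c' := (hC (c, w) List.mem_cons_self c' w hc').2 rfl
        rw [← hcc] at hc'; rw [hgc] at hc'; cases hc'
      · rw [if_neg hws]
        have hs' : ∀ x : String, (s.add w).contains x = true ↔
            ∃ c', (m.insert c w).get? c' = some x := by
          intro x
          rw [PySem.Set.contains_iff, PySem.Set.mem_add]
          constructor
          · rintro (hx | rfl)
            · obtain ⟨c', hc'⟩ := (hs x).1 ((PySem.Set.contains_iff s x).2 hx)
              have hcc : c' ≠ c := by intro h; rw [h, hgc] at hc'; cases hc'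
              exact ⟨c', by rw [PySem.Dict.get?_insert, if_neg hcc, hc']⟩
            · exact ⟨c, by rw [PySem.Dict.get?_insert, if_pos rfl]⟩
          · rintro ⟨c', hc'⟩
            rw [PySem.Dict.get?_insert] at hc'
            split_ifs at hc' with h
            · right; exact (Option.some_inj.1 hc').symm
            · left; exact (PySem.Set.contains_iff s x).1 ((hs x).2 ⟨c', hc'⟩)
        have hne' : ∀ c' w', (m.insert c w).get? c' = some w' → w' ≠ "" := by
          intro c' w' hc'
          rw [PySem.Dict.get?_insert] at hc'
          split_ifs at hc' with h
          · rw [← Option.some_inj.1 hc']; exact hwne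
          · exact hne c' w' hc'
        have hinj' : ∀ c₁ c₂ w', (m.insert c w).get? c₁ = some w' →
            (m.insert c w).get? c₂ = some w' → c₁ = c₂ := by
          intro c₁ c₂ w' h1 h2
          rw [PySem.Dict.get?_insert] at h1 h2
          split_ifs at h1 h2 with ha hb hb
          · rw [ha, hb]
          · exfalso; exact hws ((hs w).2 ⟨c₂, by rw [Option.some_inj.1 h1]; exact h2⟩)
          · exfalso; exact hws ((hs w).2 ⟨c₁, by rw [Option.some_inj.1 h2]; exact h1⟩)
          · exact hinj c₁ c₂ w' h1 h2
        rw [ih (m.insert c w) (s.add w) hs' hne' hinj' hzrest]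
        constructor
        · rintro ⟨hP', hC'⟩
          have hhead : ∀ b ∈ rest, (c = b.1 ↔ w = b.2) := by
            intro b hb
            have := hC' b hb c w (by rw [PySem.Dict.get?_insert, if_pos rfl])
            exact ⟨fun h => ((this.1 h.symm)).symm, fun h => ((this.2 h.symm)).symm⟩
          constructor
          · intro a ha b hb
            rcases List.mem_cons.1 ha with rfl | ha <;> rcases List.mem_cons.1 hb with rfl | hb
            · simp
            · exact hhead b hb
            · have := hhead a ha
              exact ⟨fun h => (this.1 h.symm).symm, fun h => (this.2 h.symm).symm⟩
            · exact hP' a ha b hb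
          · intro a ha c' w' hc'
            rcases List.mem_cons.1 ha with rfl | ha
            · constructor
              · intro h; exfalso
                have h' : c = c' := h
                rw [← h', hgc] at hc'; cases hc'
              · intro h; exfalso
                have h' : w = w' := h
                rw [← h'] at hc'
                exact hws ((hs w).2 ⟨c', hc'⟩)
            · have hcc : c' ≠ c := by intro h; rw [h, hgc] at hc'; cases hc'
              exact hC' a ha c' w' (by rw [PySem.Dict.get?_insert, if_neg hcc, hc'])
        · rintro ⟨hP, hC⟩
          constructor
          · intro a ha b hb
            exact hP a (List.mem_cons_of_mem _ ha) b (List.mem_cons_of_mem _ hb)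
          · intro a ha c' w' hc'
            rw [PySem.Dict.get?_insert] at hc'
            split_ifs at hc' with h
            · obtain ⟨rfl⟩ := h; obtain ⟨rfl⟩ := Option.some_inj.1 hc'
              have := hP a (List.mem_cons_of_mem _ ha) (c, w) List.mem_cons_self
              exact this
            · exact hC a (List.mem_cons_of_mem _ ha) c' w' hc'
    · -- pt already mapped to v
      have hvne : v ≠ "" := hne c v hgc
      have hgd : m.getD c "" = v := by rw [PySem.Dict.getD_eq_get?_getD, hgc]; rfl
      rw [hgd, if_pos hvne]
      by_cases hwv : w = v
      · rw [if_neg (by simp [hwv])]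
        rw [ih m s hs hne hinj hzrest]
        subst hwv
        constructor
        · rintro ⟨hP', hC'⟩
          have hhead : ∀ b ∈ rest, (c = b.1 ↔ w = b.2) := by
            intro b hb
            have := hC' b hb c w hgc
            exact ⟨fun h => (this.1 h.symm).symm, fun h => (this.2 h.symm).symm⟩
          constructor
          · intro a ha b hb
            rcases List.mem_cons.1 ha with rfl | ha <;> rcases List.mem_cons.1 hb with rfl | hb
            · simp
            · exact hhead b hb
            · have := hhead a ha
              exact ⟨fun h => (this.1 h.symm).symm, fun h => (this.2 h.symm).symm⟩
            · exact hP' a ha b hb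
          · intro a ha c' w' hc'
            rcases List.mem_cons.1 ha with rfl | ha
            · constructor
              · intro h
                have h' : c = c' := h
                rw [← h', hgc] at hc'
                exact Option.some_inj.1 hc'
              · intro h
                have h' : w = w' := h
                rw [← h'] at hc'
                exact hinj c c' w hgc hc'
            · exact hC' a ha c' w' hc'
        · rintro ⟨hP, hC⟩
          exact ⟨fun a ha b hb => hP a (List.mem_cons_of_mem _ ha) b (List.mem_cons_of_mem _ hb),
                 fun a ha => hC a (List.mem_cons_of_mem _ ha)⟩
      · rw [if_pos hwv]
        simp only [Bool.false_eq_true, false_iff]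
        rintro ⟨hP, hC⟩
        exact hwv ((hC (c, w) List.mem_cons_self c v hgc).1 rfl)

-- ===== VERDICT (by name: the statement is the Claim_ definition above) =====
theorem wordPattern_dictionary_spec : Claim_equal_wordPattern_dictionary := by
  intro pattern str _
  unfold Spec_wordPattern_dictionary
  unfold wordPattern_dictionary wordPattern_dictionary_alt
  set words := PySem.Str.split₀ str with hwords
  by_cases hguard : PySem.Str.len pattern ≠ (words.length : Int)
  · simp only [if_pos hguard]
  · rw [if_neg hguard, if_neg hguard]
    have hlen : pattern.toList.length = words.length := by
      have h := not_not.1 hguard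
      simpa [PySem.Str.len] using h
    set z := pattern.toList.zip words with hz
    have h0 : pvLoopA words (PySem.List.enumerate pattern.toList) PySem.Dict.empty PySem.Set.empty
        = pvLoopZ z PySem.Dict.empty PySem.Set.empty := by
      have := pvLoopA_eq_loopZ words pattern.toList 0 PySem.Dict.empty PySem.Set.empty (by omega)
      simpa using this
    have hs0 : ∀ w : String, (PySem.Set.empty (α := String)).contains w = true ↔
        ∃ c, (PySem.Dict.empty (κ := Char) (ν := String)).get? c = some w := by
      intro w; simp [pysem]
    have hne0 : ∀ c w, (PySem.Dict.empty (κ := Char) (ν := String)).get? c = some w → w ≠ "" := by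
      intro c w h; simp [pysem] at h
    have hinj0 : ∀ c₁ c₂ w, (PySem.Dict.empty (κ := Char) (ν := String)).get? c₁ = some w →
        (PySem.Dict.empty (κ := Char) (ν := String)).get? c₂ = some w → c₁ = c₂ := by
      intro c₁ c₂ w h; simp [pysem] at h
    have hz0 : ∀ a ∈ z, a.2 ≠ "" := by
      rintro ⟨x, y⟩ ha
      exact pvSplit_ne_empty str y (List.of_mem_zip ha).2
    have hloop := pvLoopZ_iff z PySem.Dict.empty PySem.Set.empty hs0 hne0 hinj0 hz0
    have hCtriv : (∀ a ∈ z, ∀ c w, (PySem.Dict.empty (κ := Char) (ν := String)).get? c = some w →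
        (a.1 = c ↔ a.2 = w)) := by
      intro a _ c w h; simp [pysem] at h
    -- card translations
    have ep : (PySem.Set.ofList pattern.toList).length = (z.map Prod.fst).toFinset.card := by
      rw [pvCardOfList, List.map_fst_zip (le_of_eq hlen)]
    have ew : (PySem.Set.ofList words).length = (z.map Prod.snd).toFinset.card := by
      rw [pvCardOfList, List.map_snd_zip (ge_of_eq hlen)]
    have ez : (PySem.Set.ofList z).length = z.toFinset.card := pvCardOfList z
    rw [h0, Bool.eq_iff_iff, hloop]
    simp only [Bool.and_eq_true, beq_iff_eq, PySem.Set.len, ep, ew, ez, Nat.cast_inj]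
    constructor
    · rintro ⟨hP, -⟩
      have hf := (pvCardMapEq z Prod.fst).2 (fun a ha b hb h => Prod.ext h ((hP a ha b hb).1 h))
      have hsd := (pvCardMapEq z Prod.snd).2 (fun a ha b hb h => Prod.ext ((hP a ha b hb).2 h) h)
      omega
    · rintro ⟨h12, h23⟩
      refine ⟨?_, hCtriv⟩
      have hf := (pvCardMapEq z Prod.fst).1 (by omega)
      have hsd := (pvCardMapEq z Prod.snd).1 h23
      intro a ha b hb
      constructor
      · intro h; exact congrArg Prod.snd (hf a ha b hb h)
      · intro h; exact congrArg Prod.fst (hsd a ha b hb h)
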